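-- pv_equiv track=rewrite | github.com/webaccount37/ReadyGo | backend/app/core/integrations/sharepoint_graph.py | compute_quick_launch_sort_order
-- ===== SOURCE A (Python) =====
-- from typing import Any
--
-- def quick_launch_node_title(node: dict[str, Any]) -> str:
--     return str(node.get("Title") or "").strip()
--
-- def _quicklaunch_is_pinned_first(node: dict[str, Any]) -> bool:
--     return quick_launch_node_title(node).casefold() == "home"
--
-- def _quicklaunch_is_pinned_last(node: dict[str, Any]) -> bool:
--     t = quick_launch_node_title(node).casefold()
--     u = str(node.get("Url") or "").strip().casefold()
--     if t == "home":
--         return False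
--     if "recycle" in t or "recyclebin" in u:
--         return True
--     if t == "edit":
--         return True
--     if "editingnavigation" in u or "designnavigation" in u:
--         return True
--     return False
--
-- def compute_quick_launch_sort_order(nodes: list[dict[str, Any]]) -> list[dict[str, Any]]:
--     """
--     Desired top-to-bottom Quick Launch order: Home, then A–Z by title, then Recycle Bin / Edit.
--     """
--     if not nodes:
--         return []
--     first = [n for n in nodes if _quicklaunch_is_pinned_first(n)]
--     last = [n for n in nodes if _quicklaunch_is_pinned_last(n)]
--     middle = [n for n in nodes if n not in first and n not in last]
--     middle_sorted = sorted(middle, key=lambda n: quick_launch_node_title(n).casefold())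
--     last_sorted = sorted(last, key=lambda n: quick_launch_node_title(n).casefold())
--     first_sorted = sorted(first, key=lambda n: quick_launch_node_title(n).casefold())
--     return first_sorted + middle_sorted + last_sorted
-- ===== SOURCE B (Python) =====
-- from typing import Any
--
--
-- def quick_launch_node_title(node: dict[str, Any]) -> str:
--     return str(node.get("Title") or "").strip()
--
--
-- def _quicklaunch_is_pinned_first(node: dict[str, Any]) -> bool:
--     return quick_launch_node_title(node).casefold() == "home"
--
--
-- def _quicklaunch_is_pinned_last(node: dict[str, Any]) -> bool:
--     t = quick_launch_node_title(node).casefold()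
--     u = str(node.get("Url") or "").strip().casefold()
--     if t == "home":
--         return False
--     if "recycle" in t or "recyclebin" in u:
--         return True
--     if t == "edit":
--         return True
--     if "editingnavigation" in u or "designnavigation" in u:
--         return True
--     return False
--
--
-- def _quicklaunch_rank(node: dict[str, Any]) -> int:
--     if _quicklaunch_is_pinned_first(node):
--         return 0
--     if _quicklaunch_is_pinned_last(node):
--         return 2
--     return 1
--
--
-- def compute_quick_launch_sort_order(nodes: list[dict[str, Any]]) -> list[dict[str, Any]]:
--     # One stable sort: group rank first (Home < A-Z middle < Recycle Bin/Edit), then title.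
--     return sorted(nodes, key=lambda n: (_quicklaunch_rank(n), quick_launch_node_title(n).casefold()))
-- ===== Notes on version B (the rewrite author's own statement) =====
-- stated objective: simpler
-- what changed: Instead of building three filtered lists (using quadratic 'n not in first/last' list-membership scans) and sorting each before concatenating, B computes one (group-rank, casefolded-title) key per node and does a single stable sort.
import Mathlib
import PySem

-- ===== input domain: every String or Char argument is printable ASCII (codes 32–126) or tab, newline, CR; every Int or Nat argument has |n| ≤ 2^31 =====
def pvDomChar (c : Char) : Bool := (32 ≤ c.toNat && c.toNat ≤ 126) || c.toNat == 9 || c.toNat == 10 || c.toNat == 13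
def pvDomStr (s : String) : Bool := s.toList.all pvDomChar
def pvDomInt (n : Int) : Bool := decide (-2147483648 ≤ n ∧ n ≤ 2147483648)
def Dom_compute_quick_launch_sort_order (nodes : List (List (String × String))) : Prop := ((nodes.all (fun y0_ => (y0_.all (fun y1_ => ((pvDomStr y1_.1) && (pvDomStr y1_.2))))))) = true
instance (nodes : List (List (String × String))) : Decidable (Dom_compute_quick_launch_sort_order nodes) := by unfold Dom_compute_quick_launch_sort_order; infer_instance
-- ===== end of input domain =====

-- B replaces A's three filtered lists (with their quadratic `n not in first` scans) and three
-- separate sorts by ONE stable sort keyed by (group rank, casefolded title); return value only.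
-- `str.casefold` is ported as PySem.Str.lower — identical on the ASCII domain Dom_ admits.

-- ===== PORT A =====
-- node.get(key) or "" : first-match lookup in the association list, None and "" both give ""
def quick_launch_node_title (node : List (String × String)) : String :=
  PySem.Str.strip (((PySem.Dict.mk node).get? "Title").getD "")

def pv_pinned_first (node : List (String × String)) : Bool :=
  PySem.Str.lower (quick_launch_node_title node) == "home"

def pv_pinned_last (node : List (String × String)) : Bool :=
  let t := PySem.Str.lower (quick_launch_node_title node)
  let u := PySem.Str.lower (PySem.Str.strip (((PySem.Dict.mk node).get? "Url").getD ""))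
  if t == "home" then false
  else if PySem.Str.isIn "recycle" t || PySem.Str.isIn "recyclebin" u then true
  else if t == "edit" then true
  else if PySem.Str.isIn "editingnavigation" u || PySem.Str.isIn "designnavigation" u then true
  else false

def compute_quick_launch_sort_order (nodes : List (List (String × String))) : List (List (String × String)) :=
  match nodes with
  | [] => []
  | _ :: _ =>
    let first := nodes.filter (fun n => pv_pinned_first n)
    let last := nodes.filter (fun n => pv_pinned_last n)
    let middle := nodes.filter (fun n => !(first.contains n) && !(last.contains n))
    let middle_sorted := PySem.List.sorted middle (fun n => PySem.Str.lower (quick_launch_node_title n))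
    let last_sorted := PySem.List.sorted last (fun n => PySem.Str.lower (quick_launch_node_title n))
    let first_sorted := PySem.List.sorted first (fun n => PySem.Str.lower (quick_launch_node_title n))
    first_sorted ++ middle_sorted ++ last_sorted

-- ===== PORT B =====
def pv_quicklaunch_rank (node : List (String × String)) : Int :=
  if pv_pinned_first node then 0 else if pv_pinned_last node then 2 else 1

def compute_quick_launch_sort_order_alt (nodes : List (List (String × String))) : List (List (String × String)) :=
  PySem.List.sorted2 nodes pv_quicklaunch_rank (fun n => PySem.Str.lower (quick_launch_node_title n))

-- ===== PRECONDITION & SPEC =====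
def Spec_compute_quick_launch_sort_order (nodes : List (List (String × String))) (out : List (List (String × String))) : Prop := out = compute_quick_launch_sort_order_alt nodes
instance (nodes : List (List (String × String))) (out : List (List (String × String))) : Decidable (Spec_compute_quick_launch_sort_order nodes out) := by unfold Spec_compute_quick_launch_sort_order; infer_instance

-- ===== CLAIM (what is proved, stated in full; the proofs are below) =====
def Claim_equal_compute_quick_launch_sort_order : Prop := ∀ (nodes : List (List (String × String))), Dom_compute_quick_launch_sort_order nodes → Spec_compute_quick_launch_sort_order nodes (compute_quick_launch_sort_order nodes)

-- ===== LEMMAS AND PROOFS =====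

-- inserting x skips a prefix it never goes before
theorem pv_insertBy_skip {α : Type} (before : α → α → Bool) (x : α) (A B : List α)
    (hA : ∀ y ∈ A, before x y = false) :
    PySem.List.insertBy before x (A ++ B) = A ++ PySem.List.insertBy before x B := by
  induction A with
  | nil => simp
  | cons y ys ih =>
    have hy : before x y = false := hA y (by simp)
    simp [PySem.List.insertBy, hy]
    exact ih (fun z hz => hA z (by simp [hz]))

-- inserting x into A ++ B lands inside A when x goes before everything in B,
-- and there it behaves like the simpler comparison g
theorem pv_insertBy_split {α : Type} (before g : α → α → Bool) (x : α) (A B : List α)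
    (hA : ∀ y ∈ A, before x y = g x y) (hB : ∀ y ∈ B, before x y = true) :
    PySem.List.insertBy before x (A ++ B) = PySem.List.insertBy g x A ++ B := by
  induction A with
  | nil =>
    cases B with
    | nil => simp [PySem.List.insertBy]
    | cons z zs => simp [PySem.List.insertBy, hB z (by simp)]
  | cons y ys ih =>
    have hy : before x y = g x y := hA y (by simp)
    by_cases h : g x y = true
    · simp [PySem.List.insertBy, hy, h]
    · simp only [Bool.not_eq_true] at h
      simp [PySem.List.insertBy, hy, h]
      exact ih (fun z hz => hA z (by simp [hz]))

-- insertion with an equivalent comparison over the list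
theorem pv_insertBy_congr {α : Type} (before g : α → α → Bool) (x : α) (A : List α)
    (hA : ∀ y ∈ A, before x y = g x y) :
    PySem.List.insertBy before x A = PySem.List.insertBy g x A := by
  have h := pv_insertBy_split before g x A [] hA (by simp)
  simpa using h

-- one more element on the right of a stable sort is one insertion
theorem pv_sorted_concat {α : Type} (ys : List α) (x : α) (k : α → String) :
    PySem.List.sorted (ys ++ [x]) k =
      PySem.List.insertBy (fun a b => decide (k a < k b)) x (PySem.List.sorted ys k) := by
  rw [PySem.List.sorted_eq_foldl_insertBy, List.foldl_append, ← PySem.List.sorted_eq_foldl_insertBy]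
  simp only [List.foldl_cons, List.foldl_nil]

-- sorted2 as the insertion fold it is (reverse = false)
theorem pv_sorted2_eq_foldl {α : Type} (xs : List α) (r : α → Int) (k : α → String) :
    PySem.List.sorted2 xs r k =
      xs.foldl (fun acc x => PySem.List.insertBy
        (fun a b => decide (r a < r b) || (!decide (r b < r a) && decide (k a < k b))) x acc) [] := rfl

-- a stable sort under the lexicographic key (rank, title) is the concatenation of the
-- per-rank stable sorts under title, when every rank is 0, 1 or 2
theorem pv_sorted2_partition {α : Type} (xs : List α) (r : α → Int) (k : α → String)
    (h3 : ∀ x ∈ xs, r x = 0 ∨ r x = 1 ∨ r x = 2) :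
    PySem.List.sorted2 xs r k =
      PySem.List.sorted (xs.filter (fun x => r x == 0)) k ++
      PySem.List.sorted (xs.filter (fun x => r x == 1)) k ++
      PySem.List.sorted (xs.filter (fun x => r x == 2)) k := by
  induction xs using List.reverseRecOn with
  | nil => simp [pv_sorted2_eq_foldl, PySem.List.sorted_eq_foldl_insertBy]
  | append_singleton xs x ih =>
    have h3' : ∀ y ∈ xs, r y = 0 ∨ r y = 1 ∨ r y = 2 := fun y hy => h3 y (by simp [hy])
    have hx := h3 x (by simp)
    have memG : ∀ (i : Int) (y : α),
        y ∈ PySem.List.sorted (xs.filter (fun z => r z == i)) k → r y = i := by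
      intro i y hy
      rw [PySem.List.mem_sorted] at hy
      have := List.of_mem_filter hy
      simpa using this
    rw [pv_sorted2_eq_foldl, List.foldl_append, ← pv_sorted2_eq_foldl, ih h3']
    simp only [List.foldl_cons, List.foldl_nil, List.filter_append]
    rcases hx with h0 | h1 | h2
    · -- rank 0: x is inserted inside the first group
      have e0 : List.filter (fun z => r z == 0) [x] = [x] := by simp [h0]
      have e1 : List.filter (fun z => r z == 1) [x] = [] := by simp [h0]
      have e2 : List.filter (fun z => r z == 2) [x] = [] := by simp [h0]
      rw [e0, e1, e2, List.append_nil, List.append_nil, pv_sorted_concat, List.append_assoc,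
        List.append_assoc]
      rw [pv_insertBy_split
            (g := fun a b => decide (k a < k b))
            (A := PySem.List.sorted (xs.filter (fun z => r z == 0)) k)
            (B := PySem.List.sorted (xs.filter (fun z => r z == 1)) k ++
                  PySem.List.sorted (xs.filter (fun z => r z == 2)) k)]
      · intro y hy; have := memG 0 y hy; simp [h0, this]
      · intro y hy
        rcases List.mem_append.mp hy with hy1 | hy2
        · have := memG 1 y hy1; simp [h0, this]
        · have := memG 2 y hy2; simp [h0, this]
    · -- rank 1: x skips the first group, is inserted inside the middle group
      have e0 : List.filter (fun z => r z == 0) [x] = [] := by simp [h1]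
      have e1 : List.filter (fun z => r z == 1) [x] = [x] := by simp [h1]
      have e2 : List.filter (fun z => r z == 2) [x] = [] := by simp [h1]
      rw [e0, e1, e2, List.append_nil, List.append_nil, pv_sorted_concat, List.append_assoc,
        List.append_assoc]
      rw [pv_insertBy_skip (A := PySem.List.sorted (xs.filter (fun z => r z == 0)) k)]
      · rw [pv_insertBy_split
              (g := fun a b => decide (k a < k b))
              (A := PySem.List.sorted (xs.filter (fun z => r z == 1)) k)
              (B := PySem.List.sorted (xs.filter (fun z => r z == 2)) k)]
        · intro y hy; have := memG 1 y hy; simp [h1, this]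
        · intro y hy; have := memG 2 y hy; simp [h1, this]
      · intro y hy; have := memG 0 y hy; simp [h1, this]
    · -- rank 2: x skips the first two groups, is inserted inside the last group
      have e0 : List.filter (fun z => r z == 0) [x] = [] := by simp [h2]
      have e1 : List.filter (fun z => r z == 1) [x] = [] := by simp [h2]
      have e2 : List.filter (fun z => r z == 2) [x] = [x] := by simp [h2]
      rw [e0, e1, e2, List.append_nil, List.append_nil, pv_sorted_concat]
      rw [pv_insertBy_skip
            (A := PySem.List.sorted (xs.filter (fun z => r z == 0)) k ++
                  PySem.List.sorted (xs.filter (fun z => r z == 1)) k)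
            (B := PySem.List.sorted (xs.filter (fun z => r z == 2)) k)]
      · have hcg := pv_insertBy_congr
          (fun a b => decide (r a < r b) || (!decide (r b < r a) && decide (k a < k b)))
          (fun a b => decide (k a < k b)) x
          (PySem.List.sorted (xs.filter (fun z => r z == 2)) k)
          (fun y hy => by have := memG 2 y hy; simp [h2, this])
        rw [List.append_assoc, hcg, List.append_assoc]
      · intro y hy
        rcases List.mem_append.mp hy with hy0 | hy1
        · have := memG 0 y hy0; simp [h2, this]
        · have := memG 1 y hy1; simp [h2, this]

-- A's three filters are exactly the three rank classes
theorem pv_filter_first (nodes : List (List (String × String))) :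
    nodes.filter (fun n => pv_pinned_first n) =
      nodes.filter (fun n => pv_quicklaunch_rank n == 0) := by
  apply List.filter_congr
  intro n _
  unfold pv_quicklaunch_rank
  by_cases h : pv_pinned_first n
  · simp [h]
  · simp only [Bool.not_eq_true] at h
    by_cases h2 : pv_pinned_last n <;> simp [h, h2]

theorem pv_pinned_last_of_first (n : List (String × String))
    (h : pv_pinned_first n = true) : pv_pinned_last n = false := by
  unfold pv_pinned_first at h
  unfold pv_pinned_last
  simp only [h]
  simp

theorem pv_filter_last (nodes : List (List (String × String))) :
    nodes.filter (fun n => pv_pinned_last n) =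
      nodes.filter (fun n => pv_quicklaunch_rank n == 2) := by
  apply List.filter_congr
  intro n _
  unfold pv_quicklaunch_rank
  by_cases h : pv_pinned_first n
  · simp [h, pv_pinned_last_of_first n h]
  · simp only [Bool.not_eq_true] at h
    by_cases h2 : pv_pinned_last n <;> simp [h, h2]

theorem pv_filter_middle (nodes : List (List (String × String))) :
    nodes.filter (fun n =>
        !((nodes.filter (fun m => pv_pinned_first m)).contains n) &&
        !((nodes.filter (fun m => pv_pinned_last m)).contains n)) =
      nodes.filter (fun n => pv_quicklaunch_rank n == 1) := by
  apply List.filter_congr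
  intro n hn
  have hf : (nodes.filter (fun m => pv_pinned_first m)).contains n = pv_pinned_first n := by
    by_cases h : pv_pinned_first n
    · simp [List.mem_filter, hn, h]
    · simp only [Bool.not_eq_true] at h
      simp [List.mem_filter, h]
  have hl : (nodes.filter (fun m => pv_pinned_last m)).contains n = pv_pinned_last n := by
    by_cases h : pv_pinned_last n
    · simp [List.mem_filter, hn, h]
    · simp only [Bool.not_eq_true] at h
      simp [List.mem_filter, h]
  rw [hf, hl]
  unfold pv_quicklaunch_rank
  by_cases h : pv_pinned_first n
  · simp [h]
  · simp only [Bool.not_eq_true] at h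
    by_cases h2 : pv_pinned_last n <;> simp [h, h2]

-- ===== VERDICT (by name: the statement is the Claim_ definition above) =====
theorem compute_quick_launch_sort_order_spec : Claim_equal_compute_quick_launch_sort_order := by
  intro nodes _
  unfold Spec_compute_quick_launch_sort_order
  unfold compute_quick_launch_sort_order compute_quick_launch_sort_order_alt
  cases nodes with
  | nil => rfl
  | cons n ns =>
    simp only
    rw [pv_filter_middle, pv_filter_first, pv_filter_last]
    rw [pv_sorted2_partition (n :: ns) pv_quicklaunch_rank
          (fun m => PySem.Str.lower (quick_launch_node_title m))
          (fun x _ => by unfold pv_quicklaunch_rank; split_ifs <;> simp)]
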